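-- pv_equiv track=rewrite | github.com/MRYO-ga/CrewAIFlowsBackend | crewaiFlowsBackend/mcp/xhs-mcp/api/xhs_api.py | base36encode
-- ===== SOURCE A (Python) =====
-- from numbers import Integral
-- from typing import Iterable, List, Optional, Tuple
--
-- def base36encode(number: Integral, alphabet: Iterable[str] = '0123456789ABCDEFGHIJKLMNOPQRSTUVWXYZ') -> str:
--
--     base36 = ''
--     alphabet = ''.join(alphabet)
--     sign = '-' if number < 0 else ''
--     number = abs(number)
--
--     while number:
--         number, i = divmod(number, len(alphabet))
--         base36 = alphabet[i] + base36
--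
--     return sign + (base36 or alphabet[0])
-- ===== SOURCE B (Python) =====
-- def base36encode(number, alphabet='0123456789ABCDEFGHIJKLMNOPQRSTUVWXYZ'):
--     alphabet = ''.join(alphabet)
--     base = len(alphabet)
--     n = abs(number)
--     k = 1
--     while base ** k <= n:
--         k += 1
--     digits = [alphabet[n // base ** (k - 1 - i) % base] for i in range(k)]
--     return ('-' if number < 0 else '') + ''.join(digits)
-- ===== Notes on version B (the rewrite author's own statement) =====
-- stated objective: alternative
-- what changed: replaces the bottom-up divmod loop that prepends each digit to an accumulator string with a positional algorithm: first count the digits k (smallest k with base**k > n), then read each digit directly as n // base**(k-1-i) % base in a single left-to-right comprehension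
import Mathlib
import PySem

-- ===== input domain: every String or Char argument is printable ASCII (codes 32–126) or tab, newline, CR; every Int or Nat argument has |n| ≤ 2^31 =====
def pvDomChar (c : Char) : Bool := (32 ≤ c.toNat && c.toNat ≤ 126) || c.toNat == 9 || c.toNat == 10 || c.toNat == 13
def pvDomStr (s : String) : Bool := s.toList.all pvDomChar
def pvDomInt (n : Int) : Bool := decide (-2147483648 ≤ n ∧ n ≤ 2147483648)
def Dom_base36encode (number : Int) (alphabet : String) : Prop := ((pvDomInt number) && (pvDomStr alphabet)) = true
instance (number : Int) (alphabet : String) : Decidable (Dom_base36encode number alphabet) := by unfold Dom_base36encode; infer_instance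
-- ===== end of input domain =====

-- B replaces A's bottom-up divmod loop (prepending digits to an accumulator string) by a
-- positional algorithm: it first counts the digits k, then reads each digit directly as
-- n // base**(k-1-i) % base for i in range(k); objective: alternative algorithm.

-- ===== PORT A =====
-- A's while loop, fuel-bounded (fuel |number|.toNat + 1 is enough under Pre_, where base ≥ 2 or n = 0).
-- alphabet[i]: the index mod n base lies in range whenever 1 ≤ base, guaranteed by Pre_, so getD is never the default there.
def base36loopA (fuel : Nat) (n : Int) (al : List Char) (acc : List Char) : List Char :=
  match fuel with
  | 0 => acc
  | f + 1 =>
    if n = 0 then acc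
    else
      base36loopA f (PySem.Int.floordiv n (al.length : Int)) al
        (((PySem.List.pyGet? al (PySem.Int.mod n (al.length : Int))).getD ' ') :: acc)

def base36encode (number : Int) (alphabet : String) : String :=
  let al := alphabet.toList
  let sign := if number < 0 then "-" else ""
  let n := |number|
  let base36 := base36loopA (n.toNat + 1) n al []
  sign ++ (if base36 = [] then String.mk [al.headD ' '] else String.mk base36)

-- ===== PORT B =====
-- B's digit-count loop `k = 1; while base ** k <= n: k += 1`, fuel-bounded the same way
-- (under Pre_ the loop stops after at most n steps, since base ≥ 2 or n = 0).
def countKB (fuel : Nat) (b n : Int) (k : Nat) : Nat :=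
  match fuel with
  | 0 => k
  | f + 1 => if b ^ k ≤ n then countKB f b n (k + 1) else k

def base36encode_alt (number : Int) (alphabet : String) : String :=
  let al := alphabet.toList
  let b : Int := al.length
  let n := |number|
  let k := countKB (n.toNat + 1) b n 1
  let digits := (List.range k).map (fun i =>
    (PySem.List.pyGet? al (PySem.Int.mod (PySem.Int.floordiv n (b ^ (k - 1 - i))) b)).getD ' ')
  (if number < 0 then "-" else "") ++ String.mk digits

-- ===== PRECONDITION & SPEC =====
-- Pre_ excludes exactly the inputs where A does not return: an empty alphabet (IndexError or
-- ZeroDivisionError) and a one-character alphabet with number ≠ 0 (A's while loop never terminates).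
def Pre_base36encode (number : Int) (alphabet : String) : Prop :=
  2 ≤ alphabet.toList.length ∨ (number = 0 ∧ 1 ≤ alphabet.toList.length)
instance (number : Int) (alphabet : String) : Decidable (Pre_base36encode number alphabet) := by
  unfold Pre_base36encode; infer_instance

def pvWitness_base36encode : Int × String := (35, "0123456789ABCDEFGHIJKLMNOPQRSTUVWXYZ")

def Spec_base36encode (number : Int) (alphabet : String) (out : String) : Prop := out = base36encode_alt number alphabet
instance (number : Int) (alphabet : String) (out : String) : Decidable (Spec_base36encode number alphabet out) := by unfold Spec_base36encode; infer_instance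

-- ===== CLAIM (what is proved, stated in full; the proofs are below) =====
def Claim_equal_base36encode : Prop := ∀ (number : Int) (alphabet : String), Dom_base36encode number alphabet → Pre_base36encode number alphabet → Spec_base36encode number alphabet (base36encode number alphabet)

-- ===== LEMMAS AND PROOFS =====

-- the character both programs write for digit value d
def digChar (al : List Char) (d : Nat) : Char := (PySem.List.pyGet? al (d : Int)).getD ' '

-- A's loop produces the base-b digits of m, most significant first
theorem loopA_digits (al : List Char) (hb : 2 ≤ al.length) :
    ∀ (fuel m : Nat), m < fuel → ∀ acc,
      base36loopA fuel (m : Int) al acc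
        = ((Nat.digits al.length m).map (digChar al)).reverse ++ acc := by
  intro fuel
  induction fuel with
  | zero => omega
  | succ f ih =>
    intro m hm acc
    by_cases h0 : m = 0
    · simp [base36loopA, h0]
    · have hmpos : 0 < m := Nat.pos_of_ne_zero h0
      have hdiv : m / al.length < m := Nat.div_lt_self hmpos (by omega)
      have hstep : base36loopA (f + 1) (m : Int) al acc
          = base36loopA f ((m / al.length : Nat) : Int) al
              (digChar al (m % al.length) :: acc) := by
        simp [base36loopA, digChar, h0, PySem.Int.floordiv_natCast, PySem.Int.mod_natCast]
      rw [hstep, ih (m / al.length) (by omega) _]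
      rw [Nat.digits_def' (by omega : 1 < al.length) hmpos]
      simp

-- B's count loop lands on the digit count, started at k with k ≤ L ≤ k + fuel
theorem countKB_eq (al : List Char) (hb : 2 ≤ al.length) (m : Nat) :
    ∀ (fuel k : Nat), k ≤ (Nat.digits al.length m).length →
      (Nat.digits al.length m).length ≤ k + fuel →
      countKB fuel (al.length : Int) (m : Int) k = (Nat.digits al.length m).length := by
  intro fuel
  induction fuel with
  | zero => intro k h1 h2; simp [countKB]; omega
  | succ f ih =>
    intro k h1 h2
    by_cases hle : (al.length : Int) ^ k ≤ (m : Int)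
    · have hle' : al.length ^ k ≤ m := by exact_mod_cast hle
      have hk : k < (Nat.digits al.length m).length := by
        rcases Nat.lt_or_ge k (Nat.digits al.length m).length with h | h
        · exact h
        · have := (Nat.digits_length_le_iff (by omega : 1 < al.length) m).mp (by omega)
          omega
      rw [countKB, if_pos hle]
      exact ih (k + 1) (by omega) (by omega)
    · have hlt : m < al.length ^ k := by exact_mod_cast lt_of_not_ge hle
      have := (Nat.digits_length_le_iff (by omega : 1 < al.length) m).mpr hlt
      rw [countKB, if_neg hle]
      omega

-- B's positional comprehension equals the reversed digit list
theorem posList_eq (al : List Char) (hb : 2 ≤ al.length) (m : Nat) :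
    (List.range (Nat.digits al.length m).length).map (fun i =>
        (PySem.List.pyGet? al (PySem.Int.mod
          (PySem.Int.floordiv (m : Int) ((al.length : Int) ^ ((Nat.digits al.length m).length - 1 - i)))
          (al.length : Int))).getD ' ')
      = ((Nat.digits al.length m).map (digChar al)).reverse := by
  apply List.ext_getElem
  · simp
  · intro i hi1 hi2
    simp only [List.length_map, List.length_range] at hi1
    simp only [List.getElem_map, List.getElem_range, List.getElem_reverse, List.length_map]
    have hcast : ((al.length : Int) ^ ((Nat.digits al.length m).length - 1 - i))
        = ((al.length ^ ((Nat.digits al.length m).length - 1 - i) : Nat) : Int) := by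
      push_cast; ring
    rw [hcast, PySem.Int.floordiv_natCast, PySem.Int.mod_natCast]
    have hgd := Nat.getD_digits m ((Nat.digits al.length m).length - 1 - i) (by omega : 2 ≤ al.length)
    rw [List.getD_eq_getElem _ _ (by omega)] at hgd
    simp only [digChar, PySem.List.pyGet?_natCast]
    rw [← hgd]

-- ===== VERDICT (by name: the statement is the Claim_ definition above) =====
theorem base36encode_spec : Claim_equal_base36encode := by
  intro number alphabet _ hpre
  unfold Spec_base36encode
  simp only [base36encode, base36encode_alt]
  rw [(Int.toNat_of_nonneg (abs_nonneg number)).symm]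
  set m := |number|.toNat with hm
  simp only [Int.toNat_natCast]
  by_cases h0 : m = 0
  · -- number = 0: A's loop exits at once, B counts k = 1 and reads digit 0
    have hlen : 1 ≤ alphabet.toList.length := by
      rcases hpre with h | ⟨_, h⟩ <;> omega
    obtain ⟨c, rest, hcr⟩ : ∃ c rest, alphabet.toList = c :: rest := by
      cases hal : alphabet.toList with
      | nil => rw [hal] at hlen; simp at hlen
      | cons c rest => exact ⟨c, rest, rfl⟩
    rw [h0]
    have hnn : ¬ ((rest.length : Int) < 0) := by omega
    simp [hnn, base36loopA, countKB, hcr]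
  · -- number ≠ 0: base ≥ 2 by Pre_
    have hb : 2 ≤ alphabet.toList.length := by
      rcases hpre with h | ⟨hz, _⟩
      · exact h
      · exact absurd (by simp [hm, hz]) h0
    have hdne : Nat.digits alphabet.toList.length m ≠ [] :=
      Nat.digits_ne_nil_iff_ne_zero.mpr h0
    have hLpos : 1 ≤ (Nat.digits alphabet.toList.length m).length := by
      cases hd : Nat.digits alphabet.toList.length m with
      | nil => exact absurd hd hdne
      | cons a t => simp
    have hLle : (Nat.digits alphabet.toList.length m).length ≤ 1 + m := by
      have h2 : m < 2 ^ (1 + m) := by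
        calc m < 2 ^ m := Nat.lt_two_pow_self
        _ ≤ 2 ^ (1 + m) := Nat.pow_le_pow_right (by omega) (by omega)
      have hm' : m < alphabet.toList.length ^ (1 + m) :=
        lt_of_lt_of_le h2 (Nat.pow_le_pow_left (by omega) _)
      exact (Nat.digits_length_le_iff (by omega) m).mpr hm'
    have hk : countKB (m + 1) (alphabet.toList.length : Int) (m : Int) 1
        = (Nat.digits alphabet.toList.length m).length :=
      countKB_eq alphabet.toList hb m (m + 1) 1 hLpos (by omega)
    have hloop := loopA_digits alphabet.toList hb (m + 1) m (by omega) []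
    have hne : ((Nat.digits alphabet.toList.length m).map (digChar alphabet.toList)).reverse
        ++ ([] : List Char) ≠ [] := by
      simpa using hdne
    rw [hloop, hk, if_neg hne, posList_eq alphabet.toList hb m]
    simp only [List.append_nil]
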